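-- pv_equiv track=rewrite | github.com/GouriVerma/DL_Model_Partitioning_Queue_Analysis | simulation_without_networkx/simulation.py | split_into_S
-- ===== SOURCE A (Python) =====
-- from itertools import combinations
--
-- def split_into_S(S, n=8):
--     """
--     Generate all contiguous groupings of n sequential layers into S groups.
--     Returns list of partitions; each partition is a list of S groups,
--     where each group is a list of layer indices.
--     """
--     cuts = list(combinations(range(1, n), S - 1))
--     partitions = []
--     for cut in cuts:
--         groups = []
--         prev = 0
--         for c in cut:
--             groups.append(list(range(prev, c)))
--             prev = c
--         groups.append(list(range(prev, n)))
--         partitions.append(groups)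
--     return partitions
-- ===== SOURCE B (Python) =====
-- def split_into_S(S, n=8):
--     """Recursive enumerator of contiguous partitions of n layers into S groups."""
--     def rec(start, remaining, s):
--         if s == 1:
--             return [[list(range(start, start + remaining))]]
--         out = []
--         for k in range(1, remaining - s + 2):
--             first = list(range(start, start + k))
--             for rest in rec(start + k, remaining - k, s - 1):
--                 out.append([first] + rest)
--         return out
--     return rec(0, n, S)
-- ===== Notes on version B (the rewrite author's own statement) =====
-- stated objective: alternative
-- what changed: Replaces materializing itertools.combinations of cut points and a second loop converting each cut tuple into groups by a single recursive enumerator over the first group's size that builds partitions directly.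
import Mathlib
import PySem

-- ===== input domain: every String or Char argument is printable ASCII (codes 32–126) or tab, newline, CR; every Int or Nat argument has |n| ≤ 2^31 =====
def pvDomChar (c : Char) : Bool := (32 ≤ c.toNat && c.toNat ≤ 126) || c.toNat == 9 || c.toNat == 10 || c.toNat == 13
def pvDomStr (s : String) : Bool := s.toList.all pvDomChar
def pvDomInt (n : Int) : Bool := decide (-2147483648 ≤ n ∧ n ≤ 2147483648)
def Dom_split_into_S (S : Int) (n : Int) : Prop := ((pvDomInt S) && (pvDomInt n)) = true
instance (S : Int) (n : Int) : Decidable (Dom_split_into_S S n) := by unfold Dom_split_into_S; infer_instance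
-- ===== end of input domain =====

-- B replaces combinations-of-cut-points with a direct recursive enumerator over first-group sizes (alternative decomposition, same output).

-- ===== PORT A =====
-- itertools.combinations(xs, r) in input order (lexicographic by position)
def pvCombs : List Int → Nat → List (List Int)
  | _, 0 => [[]]
  | [], _+1 => []
  | x :: xs, r+1 =>
      -- itertools.combinations yields nothing when r exceeds the number of remaining elements
      if xs.length < r then []
      else (pvCombs xs r).map (fun c => x :: c) ++ pvCombs xs (r+1)

def split_into_S (S : Int) (n : Int) : List (List (List Int)) :=
  -- (S-1).toNat: for S ≥ 1 (= Pre_) this is exactly S-1; for S ≤ 0 Python raises ValueError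
  let cuts := pvCombs (PySem.List.pyRange 1 n 1) (S - 1).toNat
  cuts.foldl
    (fun partitions cut =>
      let gp := cut.foldl
        (fun (gp : List (List Int) × Int) c => (gp.1 ++ [PySem.List.pyRange gp.2 c 1], c))
        ([], 0)
      partitions ++ [gp.1 ++ [PySem.List.pyRange gp.2 n 1]])
    []

-- ===== PORT B =====
def pvAltRec : Nat → Int → Int → List (List (List Int))
  | 0, _, _ => []
  | 1, start, remaining => [[PySem.List.pyRange start (start + remaining) 1]]
  | s+2, start, remaining =>
      (PySem.List.pyRange 1 (remaining - (((s : Int)) + 2) + 2) 1).foldl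
        (fun out k =>
          out ++ (pvAltRec (s+1) (start + k) (remaining - k)).map
            (fun rest => PySem.List.pyRange start (start + k) 1 :: rest))
        []

def split_into_S_alt (S : Int) (n : Int) : List (List (List Int)) :=
  pvAltRec S.toNat 0 n

-- ===== PRECONDITION & SPEC =====
-- Pre_ excludes S ≤ 0, on which A raises ValueError (combinations with negative r).
def Pre_split_into_S (S : Int) (n : Int) : Prop := 1 ≤ S
instance (S : Int) (n : Int) : Decidable (Pre_split_into_S S n) := by unfold Pre_split_into_S; infer_instance
def pvWitness_split_into_S : Int × Int := (2, 4)

def Spec_split_into_S (S : Int) (n : Int) (out : List (List (List Int))) : Prop := out = split_into_S_alt S n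
instance (S : Int) (n : Int) (out : List (List (List Int))) : Decidable (Spec_split_into_S S n out) := by unfold Spec_split_into_S; infer_instance

-- ===== CLAIM (what is proved, stated in full; the proofs are below) =====
def Claim_equal_split_into_S : Prop := ∀ (S : Int) (n : Int), Dom_split_into_S S n → Pre_split_into_S S n → Spec_split_into_S S n (split_into_S S n)

-- ===== LEMMAS AND PROOFS =====

-- groups built from a cut list (what A's inner loop computes)
def pvBG (n : Int) : Int → List Int → List (List Int)
  | prev, [] => [PySem.List.pyRange prev n 1]
  | prev, c :: cs => PySem.List.pyRange prev c 1 :: pvBG n c cs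

lemma pvFoldBG (n : Int) : ∀ (cut : List Int) (gs : List (List Int)) (prev : Int),
    (cut.foldl (fun (gp : List (List Int) × Int) c => (gp.1 ++ [PySem.List.pyRange gp.2 c 1], c)) (gs, prev)).1
      ++ [PySem.List.pyRange (cut.foldl (fun (gp : List (List Int) × Int) c => (gp.1 ++ [PySem.List.pyRange gp.2 c 1], c)) (gs, prev)).2 n 1]
    = gs ++ pvBG n prev cut := by
  intro cut
  induction cut with
  | nil => intro gs prev; simp [pvBG]
  | cons c cs ih =>
      intro gs prev
      simp only [List.foldl_cons, pvBG]
      rw [ih (gs ++ [PySem.List.pyRange prev c 1]) c]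
      simp

lemma pvFoldMap {α β : Type} (h : α → β) : ∀ (l : List α) (acc : List β),
    l.foldl (fun a c => a ++ [h c]) acc = acc ++ l.map h := by
  intro l
  induction l with
  | nil => simp
  | cons x xs ih => intro acc; simp [ih]

lemma pvCombsNil : ∀ (xs : List Int) (r : Nat), xs.length < r → pvCombs xs r = [] := by
  intro xs r h
  match xs, r with
  | _, 0 => omega
  | [], r+1 => simp [pvCombs]
  | x :: xs, r+1 =>
      have hx : xs.length < r := by simp at h; omega
      simp [pvCombs, hx]

lemma pvCombsCons (x : Int) (xs : List Int) (r : Nat) :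
    pvCombs (x :: xs) (r+1) = (pvCombs xs r).map (fun c => x :: c) ++ pvCombs xs (r+1) := by
  by_cases h : xs.length < r
  · simp [pvCombs, h, pvCombsNil xs r h, pvCombsNil xs (r+1) (by omega)]
  · simp [pvCombs, h]

lemma pvCombsRange (s : Nat) : ∀ (m : Nat) (a b : Int), (b - a).toNat ≤ m →
    pvCombs (PySem.List.pyRange a b 1) (s+1)
      = (PySem.List.pyRange a b 1).flatMap
          (fun c => (pvCombs (PySem.List.pyRange (c+1) b 1) s).map (fun cut => c :: cut)) := by
  intro m
  induction m with
  | zero =>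
      intro a b h
      rw [PySem.List.pyRange_one_eq_nil (by omega)]
      simp [pvCombs]
  | succ m ih =>
      intro a b h
      by_cases hab : b ≤ a
      · rw [PySem.List.pyRange_one_eq_nil hab]; simp [pvCombs]
      · push_neg at hab
        rw [PySem.List.pyRange_one_cons hab, pvCombsCons]
        simp only [List.flatMap_cons]
        rw [ih (a+1) b (by omega)]

lemma pvFlatMapShift (F : Int → List (List (List Int))) (t : Int) :
    ∀ (m : Nat) (a b : Int), (b - a).toNat ≤ m →
    (PySem.List.pyRange a b 1).flatMap (fun k => F (t + k))
      = (PySem.List.pyRange (t + a) (t + b) 1).flatMap F := by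
  intro m
  induction m with
  | zero =>
      intro a b h
      rw [PySem.List.pyRange_one_eq_nil (by omega), PySem.List.pyRange_one_eq_nil (by omega)]; rfl
  | succ m ih =>
      intro a b h
      by_cases hab : b ≤ a
      · rw [PySem.List.pyRange_one_eq_nil (by omega), PySem.List.pyRange_one_eq_nil (by omega)]; rfl
      · push_neg at hab
        rw [PySem.List.pyRange_one_cons hab, PySem.List.pyRange_one_cons (by omega : t + a < t + b)]
        simp only [List.flatMap_cons]
        rw [show t + a + 1 = t + (a + 1) by ring, ih (a+1) b (by omega)]

lemma pvFlatMapTrunc (F : Int → List (List (List Int))) (b' b : Int) (hb : b' ≤ b)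
    (h0 : ∀ c, b' ≤ c → c < b → F c = []) :
    ∀ (m : Nat) (a : Int), (b - a).toNat ≤ m →
    (PySem.List.pyRange a b 1).flatMap F = (PySem.List.pyRange a b' 1).flatMap F := by
  intro m
  induction m with
  | zero =>
      intro a h
      rw [PySem.List.pyRange_one_eq_nil (by omega), PySem.List.pyRange_one_eq_nil (by omega)]
  | succ m ih =>
      intro a h
      by_cases hab : b ≤ a
      · rw [PySem.List.pyRange_one_eq_nil (by omega), PySem.List.pyRange_one_eq_nil (by omega)]
      · push_neg at hab
        by_cases hb' : b' ≤ a
        · rw [PySem.List.pyRange_one_eq_nil hb']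
          simp only [List.flatMap_nil]
          apply List.flatMap_eq_nil_iff.mpr
          intro c hc
          have hm := (PySem.List.mem_pyRange_one).mp hc
          exact h0 c (by omega) (by omega)
        · push_neg at hb'
          rw [PySem.List.pyRange_one_cons hab, PySem.List.pyRange_one_cons hb']
          simp only [List.flatMap_cons]
          rw [ih (a+1) (by omega)]

lemma pvMain (n : Int) : ∀ (s : Nat) (start : Int),
    pvAltRec (s+1) start (n - start)
      = (pvCombs (PySem.List.pyRange (start+1) n 1) s).map (pvBG n start) := by
  intro s
  induction s with
  | zero =>
      intro start
      simp only [pvAltRec, pvCombs, List.map, pvBG]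
      rw [show start + (n - start) = n by ring]
  | succ s ih =>
      intro start
      have hstep : pvAltRec (s+1+1) start (n - start)
          = (PySem.List.pyRange 1 (n - start - (((s : Int)) + 2) + 2) 1).foldl
              (fun out k =>
                out ++ (pvAltRec (s+1) (start + k) (n - start - k)).map
                  (fun rest => PySem.List.pyRange start (start + k) 1 :: rest)) [] := rfl
      rw [hstep, PySem.List.foldl_append_eq_flatMap, List.nil_append,
          show n - start - (((s : Int)) + 2) + 2 = n - start - s by ring]
      have hin : ∀ k : Int,
          (pvAltRec (s+1) (start + k) (n - start - k)).map
              (fun rest => PySem.List.pyRange start (start + k) 1 :: rest)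
            = ((pvCombs (PySem.List.pyRange (start + k + 1) n 1) s).map
                (fun cut => (start + k) :: cut)).map (pvBG n start) := by
        intro k
        rw [show n - start - k = n - (start + k) by ring, ih (start + k), List.map_map, List.map_map]
        congr 1
      simp only [hin]
      have h0 : ∀ c, n - (s:Int) ≤ c → c < n →
          ((pvCombs (PySem.List.pyRange (c + 1) n 1) s).map (fun cut => c :: cut)).map (pvBG n start) = [] := by
        intro c h1 h2
        rw [pvCombsNil _ s (by rw [PySem.List.length_pyRange_one]; omega)]
        simp
      refine Eq.trans (pvFlatMapShift
        (fun c => ((pvCombs (PySem.List.pyRange (c + 1) n 1) s).map (fun cut => c :: cut)).map (pvBG n start))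
        start (n - start - (s:Int)).toNat 1 (n - start - (s:Int)) (by omega)) ?_
      rw [show start + (n - start - (s:Int)) = n - (s:Int) by ring]
      refine Eq.trans (pvFlatMapTrunc
        (fun c => ((pvCombs (PySem.List.pyRange (c + 1) n 1) s).map (fun cut => c :: cut)).map (pvBG n start))
        (n - (s:Int)) n (by omega) h0 (n - (start + 1)).toNat (start + 1) (by omega)).symm ?_
      rw [pvCombsRange s (n - (start + 1)).toNat (start + 1) n (by omega), List.map_flatMap]

theorem split_into_S_spec : Claim_equal_split_into_S := by
  intro S n _ hPre
  unfold Pre_split_into_S at hPre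
  unfold Spec_split_into_S split_into_S split_into_S_alt
  show (pvCombs (PySem.List.pyRange 1 n 1) (S - 1).toNat).foldl
      (fun partitions cut =>
        partitions ++ [(cut.foldl (fun (gp : List (List Int) × Int) c => (gp.1 ++ [PySem.List.pyRange gp.2 c 1], c)) ([], 0)).1
          ++ [PySem.List.pyRange (cut.foldl (fun (gp : List (List Int) × Int) c => (gp.1 ++ [PySem.List.pyRange gp.2 c 1], c)) ([], 0)).2 n 1]])
      [] = pvAltRec S.toNat 0 n
  refine Eq.trans (pvFoldMap (fun cut =>
      (cut.foldl (fun (gp : List (List Int) × Int) c => (gp.1 ++ [PySem.List.pyRange gp.2 c 1], c)) ([], 0)).1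
        ++ [PySem.List.pyRange (cut.foldl (fun (gp : List (List Int) × Int) c => (gp.1 ++ [PySem.List.pyRange gp.2 c 1], c)) ([], 0)).2 n 1])
      (pvCombs (PySem.List.pyRange 1 n 1) (S - 1).toNat) []) ?_
  rw [List.nil_append]
  have hmapeq : ∀ cut : List Int,
      (cut.foldl (fun (gp : List (List Int) × Int) c => (gp.1 ++ [PySem.List.pyRange gp.2 c 1], c)) ([], 0)).1
        ++ [PySem.List.pyRange (cut.foldl (fun (gp : List (List Int) × Int) c => (gp.1 ++ [PySem.List.pyRange gp.2 c 1], c)) ([], 0)).2 n 1]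
      = pvBG n 0 cut := by
    intro cut
    have := pvFoldBG n cut [] 0
    simpa using this
  simp only [hmapeq]
  have hS : S.toNat = (S - 1).toNat + 1 := by omega
  rw [hS]
  have hm := pvMain n (S - 1).toNat 0
  rw [sub_zero, zero_add] at hm
  rw [hm]
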